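-- pv_equiv track=rewrite | github.com/mlell/tapas | scripts/src/coord2sam.py | read_fastq_fields
-- ===== SOURCE A (Python) =====
-- def read_fastq_fields(iterable):
--     """ Print out a list of triples (read name, nucleotide seq., quality string),
--     given a list of text lines.
--     >>> list(read_fastq_fields(
--     ...          ["@read1","AAAA","+read1","FFFF","@read2","CCC","+","FFF"]))
--     [('read1', 'AAAA', 'FFFF'), ('read2', 'CCC', 'FFF')]
--     >>> list(read_fastq_fields(
--     ...          ['@read1','AAAA','FFFF']))
--     Traceback (most recent call last):
--     ...
--     ValueError: FASTQ line 3: File has not a number of lines divisible by 4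
--     >>> list(read_fastq_fields(
--     ...          ['read1','AAAA','+', 'FFFF']))
--     Traceback (most recent call last):
--     ...
--     ValueError: FASTQ line 1: Read name without leading '@'
--     """
--     stream = enumerate(iterable, start=1)
--
--     while True:
--         try:
--             lineno, name = next(stream)
--         except StopIteration:
--             break
--
--         if not name.startswith("@"):
--             raise ValueError("FASTQ line {}: Read name without leading '@'"
--                              .format(lineno))
--         name = name[1:]
--
--         try:
--             lineno, seq  = next(stream)
--             lineno, _    = next(stream)
--             lineno, qual = next(stream)
--             b = False
--         except StopIteration:
--             b = True # don't list StopIteration exception in traceback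
--         if b:
--             raise ValueError(
--                 "FASTQ line {}: File has not a number of lines divisible by 4"
--                 .format(lineno))
--
--         yield (name, seq, qual)
-- ===== SOURCE B (Python) =====
-- def read_fastq_fields(iterable):
--     """Single-pass phase state machine instead of nested next() grouping."""
--     out = []
--     phase = 0
--     lineno = 0
--     name = seq = None
--     for lineno, line in enumerate(iterable, start=1):
--         if phase == 0:
--             if not line.startswith("@"):
--                 raise ValueError("FASTQ line {}: Read name without leading '@'"
--                                  .format(lineno))
--             name = line[1:]
--         elif phase == 1:
--             seq = line
--         elif phase == 3:
--             out.append((name, seq, line))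
--         phase = (phase + 1) % 4
--     if phase != 0:
--         raise ValueError(
--             "FASTQ line {}: File has not a number of lines divisible by 4"
--             .format(lineno))
--     return out
-- ===== Notes on version B (the rewrite author's own statement) =====
-- stated objective: alternative
-- what changed: Replaces the generator's nested next()-grouping (four stream reads per record inside a while/try loop) by a single for loop over enumerate that runs a phase-mod-4 state machine, accumulating records into a list.
import Mathlib
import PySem

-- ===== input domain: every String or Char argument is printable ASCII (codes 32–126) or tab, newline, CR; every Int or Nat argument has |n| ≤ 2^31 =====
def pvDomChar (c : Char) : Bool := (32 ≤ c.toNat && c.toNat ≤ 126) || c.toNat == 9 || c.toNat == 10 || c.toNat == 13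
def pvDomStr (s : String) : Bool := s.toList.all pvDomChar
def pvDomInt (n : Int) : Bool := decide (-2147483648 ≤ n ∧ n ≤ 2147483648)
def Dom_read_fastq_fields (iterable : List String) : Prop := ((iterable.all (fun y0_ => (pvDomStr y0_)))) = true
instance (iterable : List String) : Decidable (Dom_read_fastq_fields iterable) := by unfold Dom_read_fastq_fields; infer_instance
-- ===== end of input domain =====

-- B replaces A's nested next()-grouping generator by a single-pass phase (line-number mod 4)
-- state machine over the lines; same return value (alternative decomposition, no speed claim).


-- ===== PORT A =====
-- A's while-True loop reads one line as the name, then three more via next();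
-- both `raise ValueError` sites are excluded by Pre_ (the port returns [] there).
def read_fastq_fields (iterable : List String) : List (String × String × String) :=
  match iterable with
  | [] => []                                   -- StopIteration on the name: break
  | name :: rest =>
    if !(PySem.Str.startswith name "@") then [] -- raise ValueError: name without '@'
    else
      match rest with
      | seq :: _plus :: qual :: rest' =>
          (PySem.Str.slice name (some 1) none, seq, qual) :: read_fastq_fields rest'
      | _ => []                                -- raise ValueError: not divisible by 4

-- ===== PORT B =====
-- loop body of Source B; the line number only feeds the two error messages (both excluded
-- by Pre_), so the fold runs over the lines themselves; state = (phase, name, seq, out)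
def altStep (st : Nat × String × String × List (String × String × String))
    (line : String) : Nat × String × String × List (String × String × String) :=
  let (phase, name, seq, out) := st
  if phase == 0 then
    -- if not line.startswith('@'): raise ValueError — excluded by Pre_
    ((phase + 1) % 4, PySem.Str.slice line (some 1) none, seq, out)
  else if phase == 1 then
    ((phase + 1) % 4, name, line, out)
  else if phase == 3 then
    ((phase + 1) % 4, name, seq, out ++ [(name, seq, line)])
  else
    ((phase + 1) % 4, name, seq, out)

def read_fastq_fields_alt (iterable : List String) : List (String × String × String) :=
  -- final `if phase != 0: raise ValueError` is excluded by Pre_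
  (iterable.foldl altStep (0, "", "", [])).2.2.2

-- ===== PRECONDITION & SPEC =====
-- exactly the inputs on which the Python A returns (no ValueError):
-- line count divisible by 4 and every 4th line (the read names) starts with '@'
def Pre_read_fastq_fields (iterable : List String) : Prop :=
  iterable.length % 4 = 0 ∧
  ∀ i ∈ List.range iterable.length, i % 4 = 0 →
    PySem.Str.startswith (iterable.getD i "") "@" = true
instance (iterable : List String) : Decidable (Pre_read_fastq_fields iterable) := by
  unfold Pre_read_fastq_fields; infer_instance

def pvWitness_read_fastq_fields : List String :=
  ["@read1", "AAAA", "+read1", "FFFF", "@read2", "CCC", "+", "FFF"]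

def Spec_read_fastq_fields (iterable : List String) (out : List (String × String × String)) : Prop := out = read_fastq_fields_alt iterable
instance (iterable : List String) (out : List (String × String × String)) : Decidable (Spec_read_fastq_fields iterable out) := by unfold Spec_read_fastq_fields; infer_instance

-- ===== CLAIM (what is proved, stated in full; the proofs are below) =====
def Claim_equal_read_fastq_fields : Prop := ∀ (iterable : List String), Dom_read_fastq_fields iterable → Pre_read_fastq_fields iterable → Spec_read_fastq_fields iterable (read_fastq_fields iterable)

-- ===== LEMMAS AND PROOFS =====

-- loop invariant: from phase 0, B's fold appends A's result to the accumulated output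
theorem altFold_key (lines : List String)
    (h4 : lines.length % 4 = 0)
    (hat : ∀ i ∈ List.range lines.length, i % 4 = 0 →
      PySem.Str.startswith (lines.getD i "") "@" = true) :
    ∀ (name seq : String) (out : List (String × String × String)),
      (lines.foldl altStep (0, name, seq, out)).2.2.2 = out ++ read_fastq_fields lines := by
  match lines with
  | [] => intro name seq out; simp [read_fastq_fields]
  | [a] => simp at h4
  | [a, b] => simp at h4
  | [a, b, c] => simp at h4
  | a :: b :: c :: d :: rest =>
    intro name seq out
    have ha : PySem.Chars.startswith a.toList ['@'] = true := by
      have := hat 0 (by simp) (by decide); simpa using this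
    have h4' : rest.length % 4 = 0 := by
      simp [List.length_cons] at h4 ⊢; omega
    have hat' : ∀ i ∈ List.range rest.length, i % 4 = 0 →
        PySem.Str.startswith (rest.getD i "") "@" = true := by
      intro i hi hm
      have := hat (i + 4) (by simp at hi ⊢; omega) (by omega)
      simpa [List.getD] using this
    have ih := altFold_key rest h4' hat'
    simp only [List.foldl_cons]
    simp [altStep]
    rw [ih]
    simp [read_fastq_fields, ha]

theorem read_fastq_fields_spec : Claim_equal_read_fastq_fields := by
  intro iterable _ hpre
  unfold Spec_read_fastq_fields read_fastq_fields_alt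
  rw [altFold_key iterable hpre.1 hpre.2]
  simp
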